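-- pv_equiv track=rewrite | github.com/Leftwitch/Beicht-Python | AB2/Aufgabe3.py | erstelleSpielkonstellationen2
-- ===== SOURCE A (Python) =====
-- def erstelleSpielkonstellationen2(player_count):
--     result = []
--     current_player = 1
--     current_player_index = 0
--     while current_player_index + 1 < player_count:
--         opponent_index = current_player % player_count
--
--         # Wenn der Spieler bereits gespielt hat, dann nächsten Spieler, bzw von vorne anfangen
--         if opponent_index == 0:
--             current_player_index += 1
--
--         # Wenn wir nicht selbst der Spieler sind, dann Spielkonstellation hinzufügen
--         if current_player_index != opponent_index:
--             # Hier beide möglichkeiten erzeugen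
--             element1 = [current_player_index+1, opponent_index+1],
--             element2 = [opponent_index+1, current_player_index+1]
--
--             # Wenn die Konstellation noch nicht vorhanden ist, dann hinzufügen
--             if element1 not in result and element2 not in result:
--                 result.append([current_player_index+1, opponent_index+1])
--
--         # Zähler für den nächsten Spieler erhöhen
--         current_player += 1
--
--     return result
-- ===== SOURCE B (Python) =====
-- def erstelleSpielkonstellationen2(player_count):
--     # Direct combination enumeration: all pairs [i, j] with 1 <= i < j <= player_count,
--     # in lexicographic order. No modular counter, no dedup check.
--     result = []
--     for i in range(1, player_count):
--         for j in range(i + 1, player_count + 1):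
--             result.append([i, j])
--     return result
-- ===== Notes on version B (the rewrite author's own statement) =====
-- stated objective: faster
-- what changed: Replaced the modular round-robin counter with its two-orientation membership dedup (a linear scan of the result per step) by direct nested-range enumeration of the pairs i<j, which needs no dedup at all.
import Mathlib
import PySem

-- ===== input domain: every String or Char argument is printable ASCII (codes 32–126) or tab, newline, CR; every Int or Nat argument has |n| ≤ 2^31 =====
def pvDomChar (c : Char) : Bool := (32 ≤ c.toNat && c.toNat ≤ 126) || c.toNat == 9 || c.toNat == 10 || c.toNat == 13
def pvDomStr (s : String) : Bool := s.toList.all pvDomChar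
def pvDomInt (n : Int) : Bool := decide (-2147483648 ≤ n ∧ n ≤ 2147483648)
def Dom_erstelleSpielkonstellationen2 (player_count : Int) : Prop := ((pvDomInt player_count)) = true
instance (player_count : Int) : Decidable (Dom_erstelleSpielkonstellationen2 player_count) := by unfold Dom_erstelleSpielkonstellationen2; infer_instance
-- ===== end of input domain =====

-- B replaces A's modular round-robin counter with its per-step dedup scan of the result
-- by direct nested-range enumeration of the pairs i<j (objective: faster, no dedup scan).


-- ===== PORT A =====
-- A's while loop; fuel only makes the recursion total (player_count^2 steps always
-- suffice, as the invariant proof below shows — the loop exits on its own condition).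
def pvLoopA (n : Int) (res : List (List Int)) (current_player current_player_index : Int) :
    Nat → List (List Int)
  | 0 => res
  | fuel+1 =>
    if current_player_index + 1 < n then
      let opp := PySem.Int.mod current_player n
      let i' := if opp = 0 then current_player_index + 1 else current_player_index
      -- Python's 'element1 not in result' is vacuously True (element1 is a 1-TUPLE, due to
      -- the trailing comma in A, and a tuple never equals a list), so only element2 is tested
      let res' := if i' ≠ opp then
          (if ¬ ((res.contains [opp+1, i'+1]) = true) then res ++ [[i'+1, opp+1]] else res)
        else res
      pvLoopA n res' (current_player+1) i' fuel
    else res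

def erstelleSpielkonstellationen2 (player_count : Int) : List (List Int) :=
  pvLoopA player_count [] 1 0 ((player_count * player_count).toNat)

-- ===== PORT B =====
def erstelleSpielkonstellationen2_alt (player_count : Int) : List (List Int) :=
  (PySem.List.pyRange 1 player_count 1).flatMap (fun i =>
    (PySem.List.pyRange (i+1) (player_count+1) 1).map (fun j => [i, j]))

-- ===== PRECONDITION & SPEC =====
def Spec_erstelleSpielkonstellationen2 (player_count : Int) (out : List (List Int)) : Prop := out = erstelleSpielkonstellationen2_alt player_count
instance (player_count : Int) (out : List (List Int)) : Decidable (Spec_erstelleSpielkonstellationen2 player_count out) := by unfold Spec_erstelleSpielkonstellationen2; infer_instance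

-- ===== CLAIM (what is proved, stated in full; the proofs are below) =====
def Claim_equal_erstelleSpielkonstellationen2 : Prop := ∀ (player_count : Int), Dom_erstelleSpielkonstellationen2 player_count → Spec_erstelleSpielkonstellationen2 player_count (erstelleSpielkonstellationen2 player_count)

-- ===== LEMMAS AND PROOFS =====

-- partial block q of the result: pairs [q+1, b+1] for b = q+1, …, r-1
def pvBlockP (q r : ℕ) : List (List Int) :=
  (List.range (r - (q+1))).map (fun (k : ℕ) => [(q:Int)+1, (q:Int)+1+(k:Int)+1])

-- all pairs A has appended strictly before "time" current_player = q*m + r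
def pvPref (m q r : ℕ) : List (List Int) :=
  (List.range q).flatMap (fun a => pvBlockP a m) ++ pvBlockP q r

def pvFull (m : ℕ) : List (List Int) := (List.range (m-1)).flatMap (fun a => pvBlockP a m)

lemma pvBlockP_nil (q r : ℕ) (h : r ≤ q+1) : pvBlockP q r = [] := by
  simp [pvBlockP, Nat.sub_eq_zero_of_le h]

lemma pvBlockP_snoc (q r : ℕ) (h : q+1 ≤ r) :
    pvBlockP q (r+1) = pvBlockP q r ++ [[(q:Int)+1, (r:Int)+1]] := by
  have h1 : r + 1 - (q+1) = (r - (q+1)) + 1 := by omega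
  rw [pvBlockP, h1, List.range_succ, List.map_append]
  have h2 : (q:Int)+1+((r - (q+1) : ℕ):Int)+1 = (r:Int)+1 := by
    have h3 : ((r - (q+1) : ℕ):Int) = (r:Int) - (q:Int) - 1 := by omega
    rw [h3]; ring
  rw [pvBlockP]
  congr 1
  simp [h2]

lemma pvPref_mem (m q r : ℕ) (hq : q < m) :
    ([(r:Int)+1, (q:Int)+1] ∈ pvPref m q r) ↔ r < q := by
  constructor
  · intro h
    rcases List.mem_append.mp h with h | h
    · rcases List.mem_flatMap.mp h with ⟨a, ha, hmem⟩
      rcases List.mem_map.mp hmem with ⟨k, hk, heq⟩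
      rw [List.mem_range] at ha hk
      simp only [List.cons.injEq, and_true] at heq
      omega
    · rcases List.mem_map.mp h with ⟨k, hk, heq⟩
      rw [List.mem_range] at hk
      simp only [List.cons.injEq, and_true] at heq
      omega
  · intro h
    refine List.mem_append.mpr (Or.inl (List.mem_flatMap.mpr
      ⟨r, List.mem_range.mpr (by omega), List.mem_map.mpr
        ⟨q - (r+1), List.mem_range.mpr (by omega), ?_⟩⟩))
    have h3 : ((q - (r+1) : ℕ):Int) = (q:Int) - (r:Int) - 1 := by omega
    rw [h3]
    congr 2
    ring

lemma pvPref_roll (m q : ℕ) : pvPref m q m = pvPref m (q+1) 0 := by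
  simp [pvPref, List.range_succ, pvBlockP_nil (q+1) 0 (by omega)]

lemma pvPref_step_app (m q r : ℕ) (h : q < r) :
    pvPref m q r ++ [[(q:Int)+1, (r:Int)+1]] = pvPref m q (r+1) := by
  simp [pvPref, pvBlockP_snoc q r (by omega)]

lemma pvPref_step_skip (m q r : ℕ) (h : r ≤ q) : pvPref m q (r+1) = pvPref m q r := by
  simp [pvPref, pvBlockP_nil q (r+1) (by omega), pvBlockP_nil q r (by omega)]

lemma pvPref_full (m q r : ℕ) (hq : q = m - 1) (hr : r < m) : pvPref m q r = pvFull m := by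
  simp [pvPref, pvFull, hq, pvBlockP_nil (m-1) r (by omega)]

lemma pvMod_cast (q r m : ℕ) (hm : 0 < m) (hr : r < m) :
    PySem.Int.mod ((q:Int)*(m:Int) + (r:Int)) (m:Int) = (r:Int) := by
  rw [PySem.Int.mod_eq_emod_of_pos (by exact_mod_cast hm)]
  have h2 : (q:Int)*(m:Int) + (r:Int) = (r:Int) + (m:Int)*(q:Int) := by ring
  rw [h2, Int.add_mul_emod_self_left,
    Int.emod_eq_of_lt (by positivity) (by exact_mod_cast hr)]

-- the loop invariant: from state (q, r) with the prefix built so far, A's loop ends in pvFull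
lemma pvLoopA_inv (m : ℕ) (hm : 2 ≤ m) :
    ∀ (fuel q r : ℕ), r < m → 1 ≤ q*m + r → (q < m-1 ∨ (q = m-1 ∧ r ≤ 1)) →
      m*(m-1) ≤ fuel + q*m + r →
      pvLoopA (m:Int) (pvPref m q r) ((q:Int)*(m:Int) + (r:Int))
        (if r = 0 then (q:Int)-1 else (q:Int)) fuel = pvFull m := by
  intro fuel
  induction fuel with
  | zero =>
    intro q r hr h1 hv hf
    have hq : q = m - 1 := by
      rcases hv with h | h
      · exfalso
        obtain ⟨k, rfl⟩ : ∃ k, m = k + 2 := ⟨m - 2, by omega⟩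
        have h' : q ≤ k := by omega
        have h3 : q*(k+2) ≤ k*(k+2) := Nat.mul_le_mul h' (le_refl (k+2))
        have e0 : k + 2 - 1 = k + 1 := rfl
        rw [e0] at hf
        have e1 : (k+2)*(k+1) = k*(k+2) + (k+2) := by ring
        rw [e1] at hf
        omega
      · exact h.1
    show pvPref m q r = pvFull m
    exact pvPref_full m q r hq hr
  | succ fuel ih =>
    intro q r hr h1 hv hf
    by_cases hstop : q = m - 1 ∧ r = 1
    · -- exit state: the loop condition is false, the result is complete
      obtain ⟨hq, hrr⟩ := hstop
      have hcond : ¬ ((if r = 0 then (q:Int)-1 else (q:Int)) + 1 < (m:Int)) := by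
        subst hrr; rw [if_neg one_ne_zero]; omega
      rw [pvLoopA, if_neg hcond]
      exact pvPref_full m q r (by omega) hr
    · -- the loop runs one more iteration
      have hq_lt : q < m := by omega
      have hcond : (if r = 0 then (q:Int)-1 else (q:Int)) + 1 < (m:Int) := by
        by_cases h0 : r = 0
        · rw [h0, if_pos rfl]
          have : q ≤ m - 1 := by omega
          omega
        · have hlt : q < m - 1 := by
            rcases hv with h | h
            · exact h
            · omega
          rw [if_neg h0]
          omega
      rw [pvLoopA, if_pos hcond]
      have hmod : PySem.Int.mod ((q:Int)*(m:Int) + (r:Int)) (m:Int) = (r:Int) :=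
        pvMod_cast q r m (by omega) hr
      simp only [hmod]
      -- after the (possible) index bump, the player index is q in both cases
      have hi2 : (if (r:Int) = 0 then (if r = 0 then (q:Int)-1 else (q:Int)) + 1
            else (if r = 0 then (q:Int)-1 else (q:Int))) = (q:Int) := by
        by_cases h0 : r = 0
        · simp [h0]
        · have h0' : (r:Int) ≠ 0 := by exact_mod_cast h0
          simp [h0]
      simp only [hi2]
      -- the updated result list is the prefix one time step later, in every case
      have hres : (if (q:Int) ≠ (r:Int) then
            (if ¬ (((pvPref m q r).contains [(r:Int)+1, (q:Int)+1]) = true)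
              then pvPref m q r ++ [[(q:Int)+1, (r:Int)+1]] else pvPref m q r)
            else pvPref m q r) = pvPref m q (r+1) := by
        by_cases hqr : q = r
        · subst hqr; simp [pvPref_step_skip m q q le_rfl]
        · have hne : (q:Int) ≠ (r:Int) := by exact_mod_cast hqr
          rw [if_pos hne]
          by_cases hlt : r < q
          · have hmem : ((pvPref m q r).contains [(r:Int)+1, (q:Int)+1]) = true := by
              simpa using (pvPref_mem m q r hq_lt).mpr hlt
            rw [if_neg (not_not_intro hmem)]
            exact (pvPref_step_skip m q r (by omega)).symm
          · have hqr' : q < r := by omega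
            have hmem : ¬ (((pvPref m q r).contains [(r:Int)+1, (q:Int)+1]) = true) := by
              intro h
              exact absurd ((pvPref_mem m q r hq_lt).mp (by simpa using h)) (by omega)
            rw [if_pos hmem]
            exact pvPref_step_app m q r hqr'
      simp only [hres]
      by_cases hend : r + 1 = m
      · -- the counter rolls over into block q+1
        have hq_lt1 : q < m - 1 := by
          rcases hv with h | h
          · exact h
          · omega
        have e1 : pvPref m q (r+1) = pvPref m (q+1) 0 := by rw [hend, pvPref_roll]
        rw [e1]
        have hmul : (q+1)*m = q*m + m := by ring
        have hrm : r = m - 1 := by omega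
        have := ih (q+1) 0 (by omega) (by rw [hmul]; omega) (by omega)
          (by rw [Nat.add_zero, hmul]; omega)
        have harg1 : ((q+1:ℕ):Int)*(m:Int) + ((0:ℕ):Int) = (q:Int)*(m:Int) + (r:Int) + 1 := by
          push_cast; rw [add_mul]; omega
        have harg2 : (if (0:ℕ) = 0 then ((q+1:ℕ):Int)-1 else ((q+1:ℕ):Int)) = (q:Int) := by
          rw [if_pos rfl]; push_cast; ring
        rw [harg1, harg2] at this
        exact this
      · have hv' : q < m-1 ∨ (q = m-1 ∧ r+1 ≤ 1) := by
          rcases hv with h | h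
          · left; exact h
          · omega
        have := ih q (r+1) (by omega) (by omega) hv' (by omega)
        have harg1 : (q:Int)*(m:Int) + ((r+1:ℕ):Int) = (q:Int)*(m:Int) + (r:Int) + 1 := by
          push_cast; ring
        have harg2 : (if r+1 = 0 then (q:Int)-1 else (q:Int)) = (q:Int) := by
          rw [if_neg (by omega)]
        rw [harg1, harg2] at this
        exact this

-- on player_count ≤ 1 A's loop never runs
lemma pvLoopA_trivial (n : Int) (hn : n ≤ 1) : ∀ fuel, pvLoopA n [] 1 0 fuel = [] := by
  intro fuel
  cases fuel with
  | zero => rfl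
  | succ f => rw [pvLoopA, if_neg (by omega)]

-- B's inner range for row index a is exactly block a
lemma pvAlt_block (m a : ℕ) :
    (PySem.List.pyRange ((1:Int)+(a:Int)+1) ((m:Int)+1) 1).map (fun j => [(1:Int)+(a:Int), j])
      = pvBlockP a m := by
  rw [PySem.List.pyRange_one]
  have hlen : (((m:Int)+1) - ((1:Int)+(a:Int)+1)).toNat = m - (a+1) := by omega
  rw [hlen, pvBlockP, List.map_map]
  apply List.map_congr_left
  intro k _
  simp only [Function.comp_apply, List.cons.injEq, and_true]
  constructor <;> ring

-- B computes pvFull on every nonnegative player_count m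
lemma pvAlt_eq_full (m : ℕ) : erstelleSpielkonstellationen2_alt (m:Int) = pvFull m := by
  rw [erstelleSpielkonstellationen2_alt, PySem.List.pyRange_one]
  have hlen : ((m:Int) - 1).toNat = m - 1 := by omega
  rw [hlen, List.flatMap_map, pvFull]
  apply List.flatMap_congr
  intro a _
  exact pvAlt_block m a

-- ===== VERDICT (by name: the statement is the Claim_ definition above) =====
theorem erstelleSpielkonstellationen2_spec : Claim_equal_erstelleSpielkonstellationen2 := by
  intro n _
  unfold Spec_erstelleSpielkonstellationen2
  by_cases hn : n ≤ 1
  · rw [erstelleSpielkonstellationen2, pvLoopA_trivial n hn,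
        erstelleSpielkonstellationen2_alt, PySem.List.pyRange_one_eq_nil hn, List.flatMap_nil]
  · replace hn : 1 < n := by omega
    have hm2 : 2 ≤ n.toNat := by omega
    set m := n.toNat with hmdef
    have hn' : n = (m:Int) := by omega
    rw [hn', erstelleSpielkonstellationen2, pvAlt_eq_full m]
    have hsq : ((m:Int)*(m:Int)).toNat = m*m := by
      have h0 : ((m:Int)*(m:Int)) = ((m*m : ℕ):Int) := by push_cast; ring
      rw [h0, Int.toNat_natCast]
    have hfuel : m*(m-1) ≤ m*m + 0*m + 1 := by
      have : m*(m-1) ≤ m*m := Nat.mul_le_mul_left m (by omega)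
      omega
    have h := pvLoopA_inv m hm2 (m*m) 0 1 (by omega) (by omega) (by omega) hfuel
    have harg1 : ((0:ℕ):Int)*(m:Int) + ((1:ℕ):Int) = 1 := by push_cast; ring
    have harg2 : (if (1:ℕ) = 0 then ((0:ℕ):Int)-1 else ((0:ℕ):Int)) = 0 := by
      norm_num
    have hpref : pvPref m 0 1 = [] := by simp [pvPref, pvBlockP]
    rw [harg1, harg2, hpref] at h
    rw [hsq]
    exact h
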